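-- pv_equiv track=rewrite | github.com/mikudehuane/ICIIA | code/widgets/widgets.py | uniform_partition
-- ===== SOURCE A (Python) =====
-- from typing import List, Tuple
--
-- def uniform_partition(range_min, range_max, num_partitions) -> List[Tuple[int, int]]:
--     if num_partitions > range_max - range_min:
--         raise ValueError('num_partitions must be less than number of items')
--     if num_partitions < 1:
--         raise ValueError('num_partitions must be greater than 0')
--     if range_max <= range_min:
--         raise ValueError('range_max must be greater than range_min')
--
--     return [(range_min + i * (range_max - range_min) // num_partitions,
--              range_min + (i + 1) * (range_max - range_min) // num_partitions)
--             for i in range(num_partitions)]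
-- ===== SOURCE B (Python) =====
-- def uniform_partition(range_min, range_max, num_partitions):
--     if num_partitions > range_max - range_min:
--         raise ValueError('num_partitions must be less than number of items')
--     if num_partitions < 1:
--         raise ValueError('num_partitions must be greater than 0')
--     if range_max <= range_min:
--         raise ValueError('range_max must be greater than range_min')
--     # Bresenham-style remainder distribution: one pass with an accumulator,
--     # no per-index multiplication/floordiv of large products.
--     q, r = divmod(range_max - range_min, num_partitions)
--     result = []
--     cur = range_min
--     acc = 0
--     for _ in range(num_partitions):
--         acc += r
--         step = q + acc // num_partitions
--         acc -= (acc // num_partitions) * num_partitions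
--         result.append((cur, cur + step))
--         cur += step
--     return result
-- ===== Notes on version B (the rewrite author's own statement) =====
-- stated objective: alternative
-- what changed: B replaces the closed-form per-index boundary formula by a Bresenham-style single pass: it takes divmod(span, n) once and walks the range with a running remainder accumulator, emitting each partition from the previous endpoint plus an incrementally computed step.
import Mathlib
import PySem

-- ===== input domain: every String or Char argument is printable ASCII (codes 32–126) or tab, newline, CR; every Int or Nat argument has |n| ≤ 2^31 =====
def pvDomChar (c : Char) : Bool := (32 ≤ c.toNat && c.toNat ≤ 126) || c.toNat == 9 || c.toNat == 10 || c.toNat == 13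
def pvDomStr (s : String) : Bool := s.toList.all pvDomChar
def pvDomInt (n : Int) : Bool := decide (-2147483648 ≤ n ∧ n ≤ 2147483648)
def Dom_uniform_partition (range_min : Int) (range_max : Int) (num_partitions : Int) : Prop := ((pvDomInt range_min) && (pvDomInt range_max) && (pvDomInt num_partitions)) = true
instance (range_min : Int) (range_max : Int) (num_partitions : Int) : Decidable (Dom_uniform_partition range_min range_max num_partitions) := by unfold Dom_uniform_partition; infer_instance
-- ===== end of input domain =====

-- B replaces the per-index closed-form boundary formula by a Bresenham-style single pass
-- with a running remainder accumulator (alternative algorithm, same asymptotic cost).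
-- Both Pythons raise ValueError on the same guarded inputs; Pre_ excludes exactly those.

-- ===== PORT A =====
def uniform_partition (range_min : Int) (range_max : Int) (num_partitions : Int) : List (Int × Int) :=
  if num_partitions > range_max - range_min then []   -- Python: raise ValueError (excluded by Pre_)
  else if num_partitions < 1 then []                  -- Python: raise ValueError (excluded by Pre_)
  else if range_max ≤ range_min then []               -- Python: raise ValueError (excluded by Pre_)
  else
    (PySem.List.pyRange 0 num_partitions 1).map (fun i =>
      (range_min + PySem.Int.floordiv (i * (range_max - range_min)) num_partitions,
       range_min + PySem.Int.floordiv ((i + 1) * (range_max - range_min)) num_partitions))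

-- ===== PORT B =====
def uniform_partition_alt (range_min : Int) (range_max : Int) (num_partitions : Int) : List (Int × Int) :=
  if num_partitions > range_max - range_min then []   -- Python: raise ValueError (excluded by Pre_)
  else if num_partitions < 1 then []                  -- Python: raise ValueError (excluded by Pre_)
  else if range_max ≤ range_min then []               -- Python: raise ValueError (excluded by Pre_)
  else
    let q := PySem.Int.floordiv (range_max - range_min) num_partitions
    let r := PySem.Int.mod (range_max - range_min) num_partitions
    let final := (PySem.List.pyRange 0 num_partitions 1).foldl
      (fun (st : Int × Int × List (Int × Int)) _ =>
        let cur := st.1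
        let acc2 := st.2.1 + r
        let step := q + PySem.Int.floordiv acc2 num_partitions
        let acc3 := acc2 - (PySem.Int.floordiv acc2 num_partitions) * num_partitions
        (cur + step, acc3, st.2.2 ++ [(cur, cur + step)]))
      (range_min, 0, [])
    final.2.2

-- ===== PRECONDITION & SPEC =====
-- Pre_ excludes exactly the inputs on which Python A raises ValueError (its three guards).
def Pre_uniform_partition (range_min : Int) (range_max : Int) (num_partitions : Int) : Prop :=
  num_partitions ≤ range_max - range_min ∧ 1 ≤ num_partitions ∧ range_min < range_max
instance (range_min : Int) (range_max : Int) (num_partitions : Int) : Decidable (Pre_uniform_partition range_min range_max num_partitions) := by unfold Pre_uniform_partition; infer_instance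
def pvWitness_uniform_partition : Int × Int × Int := (0, 10, 3)

def Spec_uniform_partition (range_min : Int) (range_max : Int) (num_partitions : Int) (out : List (Int × Int)) : Prop := out = uniform_partition_alt range_min range_max num_partitions
instance (range_min : Int) (range_max : Int) (num_partitions : Int) (out : List (Int × Int)) : Decidable (Spec_uniform_partition range_min range_max num_partitions out) := by unfold Spec_uniform_partition; infer_instance

-- ===== CLAIM (what is proved, stated in full; the proofs are below) =====
def Claim_equal_uniform_partition : Prop := ∀ (range_min : Int) (range_max : Int) (num_partitions : Int), Dom_uniform_partition range_min range_max num_partitions → Pre_uniform_partition range_min range_max num_partitions → Spec_uniform_partition range_min range_max num_partitions (uniform_partition range_min range_max num_partitions)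

-- ===== LEMMAS AND PROOFS =====

-- A fold whose body ignores the list element is an iterate of the body.
theorem foldl_const_iterate {α β : Type} (g : β → β) (l : List α) (init : β) :
    l.foldl (fun st _ => g st) init = g^[l.length] init := by
  induction l generalizing init with
  | nil => rfl
  | cons x xs ih => simp [List.foldl_cons, ih, Function.iterate_succ_apply]

-- Invariant of B's Bresenham loop: after i steps the state is the closed form of A.
theorem bres_invariant (rmin s n : Int) (hn : 0 < n) (i : Nat) :
    (fun (st : Int × Int × List (Int × Int)) =>
        let cur := st.1
        let acc2 := st.2.1 + s % n
        let step := s / n + acc2 / n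
        let acc3 := acc2 - (acc2 / n) * n
        (cur + step, acc3, st.2.2 ++ [(cur, cur + step)]))^[i] (rmin, 0, ([] : List (Int × Int)))
      = (rmin + (i * s) / n, (i * s) % n,
         (List.range i).map (fun (k : Nat) =>
           (rmin + ((k : Int) * s) / n, rmin + (((k : Int) + 1) * s) / n))) := by
  induction i with
  | zero => simp
  | succ i ih =>
    rw [Function.iterate_succ_apply', ih]
    have hn0 : n ≠ 0 := by omega
    have e1 : n * ((↑i * s) / n) + (↑i * s) % n = ↑i * s := Int.mul_ediv_add_emod _ _
    have e2 : n * (s / n) + s % n = s := Int.mul_ediv_add_emod _ _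
    have key : ((i : Int) + 1) * s
        = ((↑i * s) % n + s % n) + n * ((↑i * s) / n + s / n) := by nlinarith [e1, e2]
    have hdiv : (((i : Int) + 1) * s) / n
        = ((↑i * s) % n + s % n) / n + ((↑i * s) / n + s / n) := by
      rw [key, Int.add_mul_ediv_left _ _ hn0]
    have hmod : (((i : Int) + 1) * s) % n = ((↑i * s) % n + s % n) % n := by
      rw [key, Int.add_mul_emod_self_left]
    refine Prod.ext ?_ (Prod.ext ?_ ?_) <;> simp only [Nat.cast_add, Nat.cast_one]
    · rw [hdiv]; ring
    · have hd := Int.emod_def ((↑i * s) % n + s % n) n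
      rw [hmod]; linarith [hd]
    · rw [List.range_succ, List.map_append]
      congr 1
      simp only [List.map_cons, List.map_nil, List.cons.injEq, and_true, Prod.mk.injEq,
        true_and]
      rw [hdiv]; ring

theorem uniform_partition_spec : Claim_equal_uniform_partition := by
  intro rmin rmax np _ hpre
  obtain ⟨h1, h2, h3⟩ := hpre
  have hn : 0 < np := by omega
  unfold Spec_uniform_partition uniform_partition uniform_partition_alt
  rw [if_neg (by omega), if_neg (by omega), if_neg (by omega),
      if_neg (by omega), if_neg (by omega), if_neg (by omega)]
  simp only [PySem.Int.floordiv_eq_ediv_of_pos hn, PySem.Int.mod_eq_emod_of_pos hn]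
  rw [foldl_const_iterate
      (fun (st : Int × Int × List (Int × Int)) =>
        let cur := st.1
        let acc2 := st.2.1 + (rmax - rmin) % np
        let step := (rmax - rmin) / np + acc2 / np
        let acc3 := acc2 - (acc2 / np) * np
        (cur + step, acc3, st.2.2 ++ [(cur, cur + step)]))]
  rw [PySem.List.length_pyRange_one, bres_invariant rmin (rmax - rmin) np hn]
  rw [PySem.List.pyRange_one, List.map_map]
  dsimp only
  apply List.map_congr_left
  intro k hk
  simp only [Function.comp]
  ring_nf
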